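-- pv_equiv track=rewrite | github.com/pypi-data/pypi-mirror-335 | packages/p2smi/p2smi-1.0.0-py3-none-any.whl/p2smi/synthRules.py | check_charge
-- ===== SOURCE A (Python) =====
-- charged = ["H", "R", "K", "E", "D"]
--
-- def check_charge(seq):
--     # Check that there is at least one charged residue every 5 residues
--     count = 0
--     for resi in seq:
--         count += 1
--         if resi in charged:
--             count = 0
--         if count >= 5:
--             return False
--     return True
-- ===== SOURCE B (Python) =====
-- charged = ["H", "R", "K", "E", "D"]
--
-- def check_charge(seq):
--     # Gap analysis: collect indices of charged residues, then check that the
--     # leading gap, every internal gap and the trailing gap are all < 5.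
--     charged_set = {"H", "R", "K", "E", "D"}
--     idxs = [i for i, resi in enumerate(seq) if resi in charged_set]
--     if not idxs:
--         return len(seq) < 5
--     gaps = [idxs[0]]
--     gaps += [b - a - 1 for a, b in zip(idxs, idxs[1:])]
--     gaps.append(len(seq) - idxs[-1] - 1)
--     return all(g < 5 for g in gaps)
-- ===== Notes on version B (the rewrite author's own statement) =====
-- stated objective: alternative
-- what changed: Replaced the running reset-counter scan with an early return by an index-then-gap analysis: build the list of charged-residue indices, compute leading/internal/trailing gaps, and return whether all gaps are < 5.
import Mathlib
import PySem

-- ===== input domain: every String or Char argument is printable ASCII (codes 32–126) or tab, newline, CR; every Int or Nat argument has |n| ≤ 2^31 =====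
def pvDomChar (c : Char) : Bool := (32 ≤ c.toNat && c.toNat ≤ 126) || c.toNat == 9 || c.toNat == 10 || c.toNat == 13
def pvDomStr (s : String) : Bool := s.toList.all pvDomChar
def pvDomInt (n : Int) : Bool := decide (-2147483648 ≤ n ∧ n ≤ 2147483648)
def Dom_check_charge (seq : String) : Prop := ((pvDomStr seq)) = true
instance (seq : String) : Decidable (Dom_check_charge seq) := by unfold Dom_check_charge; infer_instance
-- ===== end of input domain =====

-- B differs from A by decomposition only (gap analysis instead of a reset-counter scan); same return value on every input.
-- ===== PORT A =====
def charged : List Char := ['H', 'R', 'K', 'E', 'D']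

-- A's for-loop with early return, as structural recursion over the characters with the running count.
def checkChargeLoop : List Char → Nat → Bool
  | [], _ => true
  | resi :: rest, count =>
    let count1 := count + 1
    let count2 := if charged.contains resi then 0 else count1
    if 5 ≤ count2 then false else checkChargeLoop rest count2

def check_charge (seq : String) : Bool :=
  checkChargeLoop seq.toList 0

-- ===== PORT B =====
def chargedSetB : PySem.Set Char := PySem.Set.ofList ['H', 'R', 'K', 'E', 'D']

-- [i for i, resi in enumerate(seq) if resi in charged_set]
def chargedIdxs (l : List Char) (s : Int) : List Int :=
  ((PySem.List.enumerate l s).filter (fun p => PySem.Set.contains chargedSetB p.2)).map (·.1)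

def check_charge_alt (seq : String) : Bool :=
  let l := seq.toList
  match chargedIdxs l 0 with
  | [] => decide ((l.length : Int) < 5)
  | i0 :: tl =>
    let gaps := (i0 :: (List.zip (i0 :: tl) tl).map (fun p => p.2 - p.1 - 1)) ++
      [(l.length : Int) - (i0 :: tl).getLast (List.cons_ne_nil _ _) - 1]
    gaps.all (fun g => decide (g < 5))

-- ===== PRECONDITION & SPEC =====
def Spec_check_charge (seq : String) (out : Bool) : Prop := out = check_charge_alt seq
instance (seq : String) (out : Bool) : Decidable (Spec_check_charge seq out) := by unfold Spec_check_charge; infer_instance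

-- ===== CLAIM (what is proved, stated in full; the proofs are below) =====
def Claim_equal_check_charge : Prop := ∀ (seq : String), Dom_check_charge seq → Spec_check_charge seq (check_charge seq)

-- ===== LEMMAS AND PROOFS =====

-- B's body on a plain character list.
def baltL (l : List Char) : Bool :=
  match chargedIdxs l 0 with
  | [] => decide ((l.length : Int) < 5)
  | i0 :: tl =>
    ((i0 :: (List.zip (i0 :: tl) tl).map (fun p => p.2 - p.1 - 1)) ++
      [(l.length : Int) - (i0 :: tl).getLast (List.cons_ne_nil _ _) - 1]).all
      (fun g => decide (g < 5))

lemma check_charge_alt_eq (seq : String) : check_charge_alt seq = baltL seq.toList := rfl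

lemma chargedSetB_contains (c : Char) :
    PySem.Set.contains chargedSetB c = charged.contains c := by
  have h : chargedSetB = charged := by decide
  rw [h]; rfl

lemma chargedIdxs_cons (x : Char) (l : List Char) (s : Int) :
    chargedIdxs (x :: l) s =
      if charged.contains x then s :: chargedIdxs l (s + 1) else chargedIdxs l (s + 1) := by
  simp only [chargedIdxs, PySem.List.enumerate_cons, List.filter_cons, chargedSetB_contains]
  by_cases h : x ∈ charged <;> simp [h]

lemma chargedIdxs_shift (l : List Char) (s : Int) :
    chargedIdxs l s = (chargedIdxs l 0).map (· + s) := by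
  induction l generalizing s with
  | nil => simp [chargedIdxs]
  | cons x l ih =>
    rw [chargedIdxs_cons, chargedIdxs_cons]
    have hmm : List.map (· + s) (chargedIdxs l (0 + 1)) = List.map (· + (s + 1)) (chargedIdxs l 0) := by
      rw [ih (0 + 1), List.map_map]
      apply List.map_congr_left; intro a _; simp [Function.comp]; ring
    by_cases h : charged.contains x = true
    · rw [if_pos h, if_pos h, ih (s + 1), List.map_cons, hmm, zero_add]
    · rw [if_neg h, if_neg h, ih (s + 1), hmm]

lemma chargedIdxs_nonCh (l : List Char) (s : Int)
    (h : ∀ x ∈ l, charged.contains x = false) : chargedIdxs l s = [] := by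
  induction l generalizing s with
  | nil => simp [chargedIdxs]
  | cons x l ih =>
    rw [chargedIdxs_cons]
    have hx := h x (List.mem_cons_self ..)
    simp only [hx, if_false, Bool.false_eq_true]
    exact ih (s+1) (fun y hy => h y (List.mem_cons_of_mem _ hy))

lemma chargedIdxs_split (pre : List Char) (ch : Char) (rest : List Char)
    (hpre : ∀ x ∈ pre, charged.contains x = false) (hch : charged.contains ch = true) :
    chargedIdxs (pre ++ ch :: rest) 0 =
      (pre.length : Int) :: (chargedIdxs rest 0).map (· + ((pre.length : Int) + 1)) := by
  induction pre with
  | nil =>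
    rw [List.nil_append, chargedIdxs_cons, if_pos hch]
    simp only [zero_add]
    rw [chargedIdxs_shift rest 1]
    simp
  | cons x pre ih =>
    have hx := hpre x (List.mem_cons_self ..)
    rw [List.cons_append, chargedIdxs_cons, if_neg (by rw [hx]; exact Bool.false_ne_true),
      chargedIdxs_shift, ih (fun y hy => hpre y (List.mem_cons_of_mem _ hy)),
      List.map_cons, List.map_map]
    simp only [List.length_cons, Nat.cast_add, Nat.cast_one]
    congr 1
    exact List.map_congr_left (fun a _ => by simp only [Function.comp_apply]; ring)

lemma loopA_nonCh (l : List Char) (c : Nat) (hc : c < 5)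
    (h : ∀ x ∈ l, charged.contains x = false) :
    checkChargeLoop l c = decide (c + l.length < 5) := by
  induction l generalizing c with
  | nil => simp [checkChargeLoop]; omega
  | cons x l ih =>
    have hx := h x (List.mem_cons_self ..)
    simp only [checkChargeLoop, hx, Bool.false_eq_true, if_false]
    by_cases h5 : 5 ≤ c + 1
    · simp only [h5, if_true, List.length_cons]
      symm; simp; omega
    · simp only [h5, if_false]
      rw [ih (c+1) (by omega) (fun y hy => h y (List.mem_cons_of_mem _ hy))]
      simp only [List.length_cons]
      congr 1
      simp only [eq_iff_iff]; omega

lemma eq_and_of_true (b x : Bool) (h : b = true) : x = (b && x) := by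
  rw [h, Bool.true_and]

lemma false_eq_and_of_false (b x : Bool) (h : b = false) : false = (b && x) := by
  rw [h, Bool.false_and]

lemma dropWhile_head_false {p : Char → Bool} :
    ∀ (l : List Char) {y : Char} {ys : List Char}, l.dropWhile p = y :: ys → p y = false := by
  intro l
  induction l with
  | nil => intro y ys h; simp [List.dropWhile] at h
  | cons a t ih =>
    intro y ys h
    by_cases hp : p a = true
    · rw [List.dropWhile_cons_of_pos hp] at h; exact ih h
    · rw [List.dropWhile_cons_of_neg hp] at h
      injection h with h1 h2
      subst h1
      simpa using hp

lemma loopA_split (pre : List Char) (ch : Char) (rest : List Char) (c : Nat) (hc : c < 5)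
    (hpre : ∀ x ∈ pre, charged.contains x = false) (hch : charged.contains ch = true) :
    checkChargeLoop (pre ++ ch :: rest) c =
      (decide (c + pre.length < 5) && checkChargeLoop rest 0) := by
  induction pre generalizing c with
  | nil =>
    simp only [List.nil_append, checkChargeLoop, hch, if_true, List.length_nil]
    rw [if_neg (by omega : ¬ (5 ≤ 0))]
    exact eq_and_of_true _ _ (decide_eq_true (by omega))
  | cons x pre ih =>
    have hx := hpre x (List.mem_cons_self ..)
    simp only [List.cons_append, checkChargeLoop, hx, Bool.false_eq_true, if_false]
    by_cases h5 : 5 ≤ c + 1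
    · rw [if_pos h5]
      exact false_eq_and_of_false _ _
        (decide_eq_false (by simp only [List.length_cons]; omega))
    · rw [if_neg h5, ih (c + 1) (by omega) (fun y hy => hpre y (List.mem_cons_of_mem _ hy))]
      simp only [List.length_cons]
      have he : c + 1 + pre.length = c + (pre.length + 1) := by omega
      rw [he]
      rfl

def gapTail (i0 : Int) (tl : List Int) (L : Int) : Bool :=
  ((List.zip (i0 :: tl) tl).map (fun p => p.2 - p.1 - 1)).all (fun g => decide (g < 5)) &&
    decide (L - (i0 :: tl).getLast (List.cons_ne_nil _ _) - 1 < 5)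

lemma gapTail_nil (i0 L : Int) : gapTail i0 [] L = decide (L - i0 - 1 < 5) := by
  simp [gapTail]

lemma gapTail_cons (i0 j : Int) (tl : List Int) (L : Int) :
    gapTail i0 (j :: tl) L = (decide (j - i0 - 1 < 5) && gapTail j tl L) := by
  simp [gapTail, List.getLast_cons, Bool.and_assoc]

lemma gapTail_shift (k i0 : Int) (tl : List Int) (L : Int) :
    gapTail (i0 + k) (tl.map (· + k)) (L + k) = gapTail i0 tl L := by
  induction tl generalizing i0 with
  | nil =>
    rw [List.map_nil, gapTail_nil, gapTail_nil]
    simp only [decide_eq_decide]; omega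
  | cons j tl ih =>
    rw [List.map_cons, gapTail_cons, gapTail_cons, ih j]
    congr 1
    simp only [decide_eq_decide]; omega

lemma baltL_empty (l : List Char) (h : chargedIdxs l 0 = []) :
    baltL l = decide ((l.length : Int) < 5) := by
  simp [baltL, h]

lemma baltL_eq_gapTail (l : List Char) (i0 : Int) (tl : List Int)
    (h : chargedIdxs l 0 = i0 :: tl) :
    baltL l = (decide (i0 < 5) && gapTail i0 tl (l.length : Int)) := by
  simp [baltL, h, gapTail, List.all_append]

lemma baltL_nonCh (l : List Char) (h : ∀ x ∈ l, charged.contains x = false) :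
    baltL l = decide ((l.length : Int) < 5) :=
  baltL_empty l (chargedIdxs_nonCh l 0 h)

lemma baltL_split (pre : List Char) (ch : Char) (rest : List Char)
    (hpre : ∀ x ∈ pre, charged.contains x = false) (hch : charged.contains ch = true) :
    baltL (pre ++ ch :: rest) = (decide ((pre.length : Int) < 5) && baltL rest) := by
  have hidx := chargedIdxs_split pre ch rest hpre hch
  have hlen : ((pre ++ ch :: rest).length : Int)
      = (rest.length : Int) + ((pre.length : Int) + 1) := by
    simp [List.length_append]; ring
  rcases hR : chargedIdxs rest 0 with _ | ⟨j0, jt⟩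
  · rw [hR] at hidx
    simp only [List.map_nil] at hidx
    rw [baltL_eq_gapTail _ _ _ hidx, gapTail_nil, baltL_empty rest hR, hlen]
    congr 1
    simp only [decide_eq_decide]; omega
  · rw [hR] at hidx
    simp only [List.map_cons] at hidx
    rw [baltL_eq_gapTail _ _ _ hidx, gapTail_cons, baltL_eq_gapTail rest j0 jt hR, hlen,
      gapTail_shift ((pre.length : Int) + 1) j0 jt (rest.length : Int)]
    congr 2
    simp only [decide_eq_decide]; omega

lemma main_lemma : ∀ (n : Nat) (l : List Char), l.length ≤ n → checkChargeLoop l 0 = baltL l := by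
  intro n
  induction n with
  | zero =>
    intro l hl
    have : l = [] := List.eq_nil_of_length_eq_zero (by omega)
    subst this; decide
  | succ n ih =>
    intro l hl
    rcases hd : l.dropWhile (fun c => !charged.contains c) with _ | ⟨ch, rest⟩
    · have hall : ∀ x ∈ l, charged.contains x = false := by
        intro x hx
        have : x ∈ l.takeWhile (fun c => !charged.contains c) := by
          rw [← List.takeWhile_append_dropWhile (p := fun c => !charged.contains c) (l := l), hd] at hx
          simpa using hx
        have := List.mem_takeWhile_imp this
        simpa using this
      rw [loopA_nonCh l 0 (by omega) hall, baltL_nonCh l hall]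
      simp only [Nat.zero_add]
      congr 1
      simp only [eq_iff_iff]; omega
    · set pre := l.takeWhile (fun c => !charged.contains c) with hpre
      have hsplit : l = pre ++ ch :: rest := by
        rw [hpre, ← hd, List.takeWhile_append_dropWhile]
      have hprem : ∀ x ∈ pre, charged.contains x = false := by
        intro x hx
        have := List.mem_takeWhile_imp hx
        simpa using this
      have hch : charged.contains ch = true := by
        have h1 := dropWhile_head_false l hd
        simpa using h1
      have hrest : rest.length ≤ n := by
        have : l.length = pre.length + 1 + rest.length := by
          rw [hsplit]; simp [List.length_append]; omega
        omega
      rw [hsplit, loopA_split pre ch rest 0 (by omega) hprem hch,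
        baltL_split pre ch rest hprem hch, ih rest hrest]
      congr 1
      simp only [Nat.zero_add, decide_eq_decide]
      omega

-- ===== VERDICT (by name: the statement is the Claim_ definition above) =====
theorem check_charge_spec : Claim_equal_check_charge := by
  intro seq _
  unfold Spec_check_charge
  rw [check_charge_alt_eq, check_charge]
  exact main_lemma seq.toList.length seq.toList le_rfl
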